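-- pv_equiv track=rewrite | github.com/yeinoh36/cote | 프로그래머스/1/42862. 체육복/체육복.py | solution
-- ===== SOURCE A (Python) =====
-- def solution(n, lost, reserve):
--     answer = n - len(lost)
--
--     # 1 자기자신 빼기
--     for who in lost[:]:
--         if who in reserve:
--             reserve.remove(who)
--             lost.remove(who)
--             answer += 1
--
--     while lost:
--
--         for who in lost[:]:
--             former = who-1
--             latter = who+1
--
--             # 2 구제불가 lost 제거하기
--             if not(former > 0 and former in reserve) and not(latter < n+1 and latter in reserve):
--                 lost.remove(who)
--
--             # 3 유일구제 lost 구제하기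
--             elif (former > 0 and former in reserve) and not(latter < n+1 and latter in reserve):
--                 answer += 1
--                 reserve.remove(former)
--                 lost.remove(who)
--
--             elif (latter < n+1 and latter in reserve) and not(former > 0 and former in reserve):
--                 answer += 1
--                 reserve.remove(latter)
--                 lost.remove(who)
--                 continue
--
--         for who in reserve[:]:
--             former = who-1
--             latter = who+1
--
--             # 유일무이 reserve 나눔하기
--             if (former > 0 and former in lost) and not(latter < n+1 and latter in lost):
--                 answer += 1
--                 reserve.remove(who)
--                 lost.remove(former)
--
--             elif (latter < n+1 and latter in lost) and not(former > 0 and former in lost):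
--                 answer += 1
--                 reserve.remove(who)
--                 lost.remove(latter)
--
--     return answer
-- ===== SOURCE B (Python) =====
-- def solution(n, lost, reserve):
--     # Single sorted greedy pass instead of A's iterate-to-fixpoint resolution.
--     # Note: A mutates its lost/reserve arguments in place; B does not (return value equal).
--     remaining = list(reserve)
--     need = []
--     for who in lost:
--         if who in remaining:
--             remaining.remove(who)      # has own spare: self-rescued
--         else:
--             need.append(who)
--     answer = n - len(need)
--     need.sort()
--     for who in need:
--         if who - 1 > 0 and (who - 1) in remaining:
--             remaining.remove(who - 1)
--             answer += 1
--         elif who + 1 < n + 1 and (who + 1) in remaining: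
--             remaining.remove(who + 1)
--             answer += 1
--     return answer
-- ===== Notes on version B (the rewrite author's own statement) =====
-- stated objective: simpler
-- what changed: A resolves matches by repeatedly sweeping lost and reserve to a fixpoint (forced-move propagation in a while loop); B does one self-rescue scan and then a single left-then-right greedy pass over the sorted remaining lost list.
import Mathlib
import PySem

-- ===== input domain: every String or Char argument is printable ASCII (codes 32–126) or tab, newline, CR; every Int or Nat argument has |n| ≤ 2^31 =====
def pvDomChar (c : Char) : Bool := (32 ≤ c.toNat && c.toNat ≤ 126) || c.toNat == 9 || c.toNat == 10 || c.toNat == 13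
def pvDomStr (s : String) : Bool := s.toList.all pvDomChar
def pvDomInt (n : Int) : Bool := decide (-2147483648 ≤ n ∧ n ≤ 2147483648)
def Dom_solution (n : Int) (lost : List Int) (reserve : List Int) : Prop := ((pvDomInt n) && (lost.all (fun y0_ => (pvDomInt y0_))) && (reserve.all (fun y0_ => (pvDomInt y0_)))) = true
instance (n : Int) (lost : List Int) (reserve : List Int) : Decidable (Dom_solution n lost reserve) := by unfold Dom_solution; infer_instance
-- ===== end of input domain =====

-- B replaces A's iterate-to-fixpoint forced-move resolution by one self-rescue scan plus a single
-- sorted left-then-right greedy pass (objective: simpler).  A mutates its lost/reserve arguments in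
-- place, B does not; the equivalence proved here is about the return value.
-- Python list.remove(x) raises ValueError when x is absent; in A every remove call happens with the
-- element present (a consequence of the pass invariants proved below), where List.erase is exact.

-- ===== PORT A =====
-- state: (lost, reserve, answer)

-- phase "1 자기자신 빼기": for who in lost[:]: if who in reserve: cancel both, answer += 1
def pvSelf : List Int → List Int × List Int × Int → List Int × List Int × Int
  | [], st => st
  | who :: s, (lost, res, ans) =>
      if res.contains who then pvSelf s (lost.erase who, res.erase who, ans + 1)
      else pvSelf s (lost, res, ans)

-- the "for who in lost[:]" pass of the while loop
def pvLostPass (n : Int) : List Int → List Int × List Int × Int → List Int × List Int × Int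
  | [], st => st
  | who :: s, (lost, res, ans) =>
      let f := decide (who - 1 > 0) && res.contains (who - 1)
      let l := decide (who + 1 < n + 1) && res.contains (who + 1)
      if !f && !l then pvLostPass n s (lost.erase who, res, ans)
      else if f && !l then pvLostPass n s (lost.erase who, res.erase (who - 1), ans + 1)
      else if l && !f then pvLostPass n s (lost.erase who, res.erase (who + 1), ans + 1)
      else pvLostPass n s (lost, res, ans)

-- the "for who in reserve[:]" pass of the while loop
def pvResPass (n : Int) : List Int → List Int × List Int × Int → List Int × List Int × Int
  | [], st => st
  | who :: s, (lost, res, ans) =>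
      let f := decide (who - 1 > 0) && lost.contains (who - 1)
      let l := decide (who + 1 < n + 1) && lost.contains (who + 1)
      if f && !l then pvResPass n s (lost.erase (who - 1), res.erase who, ans + 1)
      else if l && !f then pvResPass n s (lost.erase (who + 1), res.erase who, ans + 1)
      else pvResPass n s (lost, res, ans)

-- the while loop; each iteration strictly shrinks lost (pvLostRes_shrink below), so fuel
-- lost.length + 1 makes the port total exactly like the Python loop
def pvWhile (n : Int) : Nat → List Int × List Int × Int → Int
  | 0, (_, _, ans) => ans
  | fuel + 1, (lost, res, ans) =>
      if lost.isEmpty then ans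
      else
        let st1 := pvLostPass n lost (lost, res, ans)
        let st2 := pvResPass n st1.2.1 st1
        pvWhile n fuel st2

def solution (n : Int) (lost : List Int) (reserve : List Int) : Int :=
  let st0 := pvSelf lost (lost, reserve, n - lost.length)
  pvWhile n (st0.1.length + 1) st0

-- ===== PORT B =====
-- split lost into self-rescued (cancelled against reserve) and still-needy students
def pvSplit : List Int → List Int × List Int → List Int × List Int
  | [], st => st
  | who :: s, (need, rem) =>
      if rem.contains who then pvSplit s (need, rem.erase who)
      else pvSplit s (need ++ [who], rem)

-- single greedy pass over the sorted needy list: left neighbour first, then right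
def pvGreedy (n : Int) : List Int → List Int → Int → Int
  | [], _, ans => ans
  | who :: s, rem, ans =>
      if decide (who - 1 > 0) && rem.contains (who - 1) then pvGreedy n s (rem.erase (who - 1)) (ans + 1)
      else if decide (who + 1 < n + 1) && rem.contains (who + 1) then pvGreedy n s (rem.erase (who + 1)) (ans + 1)
      else pvGreedy n s rem ans

def solution_alt (n : Int) (lost : List Int) (reserve : List Int) : Int :=
  let p := pvSplit lost ([], reserve)
  pvGreedy n (PySem.List.sorted p.1 (fun x => x) false) p.2 (n - p.1.length)

-- ===== PRECONDITION & SPEC =====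
def Spec_solution (n : Int) (lost : List Int) (reserve : List Int) (out : Int) : Prop := out = solution_alt n lost reserve
instance (n : Int) (lost : List Int) (reserve : List Int) (out : Int) : Decidable (Spec_solution n lost reserve out) := by unfold Spec_solution; infer_instance

-- ===== CLAIM (what is proved, stated in full; the proofs are below) =====
def Claim_equal_solution : Prop := ∀ (n : Int) (lost : List Int) (reserve : List Int), Dom_solution n lost reserve → Spec_solution n lost reserve (solution n lost reserve)

-- ===== LEMMAS AND PROOFS =====

def pvCnt (l : List Int) : Int → Nat := fun v => l.count v
def pvDec (R : Int → Nat) (x : Int) : Int → Nat := fun v => if v = x then R v - 1 else R v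

def pvM (n : Int) : List Int → (Int → Nat) → Nat
  | [], _ => 0
  | w :: t, R =>
      max (pvM n t R)
        (max (if 0 < w - 1 ∧ 0 < R (w - 1) then 1 + pvM n t (pvDec R (w - 1)) else 0)
             (if w + 1 < n + 1 ∧ 0 < R (w + 1) then 1 + pvM n t (pvDec R (w + 1)) else 0))

def pvUsable (n w x : Int) : Prop := (x = w - 1 ∧ 0 < x) ∨ (x = w + 1 ∧ x < n + 1)

theorem pvM_nil (n : Int) (R : Int → Nat) : pvM n [] R = 0 := rfl
theorem pvM_cons (n : Int) (w : Int) (t : List Int) (R : Int → Nat) :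
    pvM n (w :: t) R =
      max (pvM n t R)
        (max (if 0 < w - 1 ∧ 0 < R (w - 1) then 1 + pvM n t (pvDec R (w - 1)) else 0)
             (if w + 1 < n + 1 ∧ 0 < R (w + 1) then 1 + pvM n t (pvDec R (w + 1)) else 0)) := rfl

theorem pvDec_comm (R : Int → Nat) (x y : Int) : pvDec (pvDec R x) y = pvDec (pvDec R y) x := by
  funext v
  simp only [pvDec]
  split_ifs <;> rfl

theorem pvDec_le (R : Int → Nat) (x v : Int) : pvDec R x v ≤ R v := by
  simp only [pvDec]; split_ifs <;> omega

theorem pvM_skip_le (n w : Int) (t : List Int) (R : Int → Nat) : pvM n t R ≤ pvM n (w :: t) R := by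
  rw [pvM_cons]; exact le_max_left _ _

theorem pvM_take_f_le (n w : Int) (t : List Int) (R : Int → Nat)
    (h : 0 < w - 1 ∧ 0 < R (w - 1)) : 1 + pvM n t (pvDec R (w - 1)) ≤ pvM n (w :: t) R := by
  rw [pvM_cons, if_pos h]
  exact le_trans (le_max_left _ _) (le_max_right _ _)

theorem pvM_take_l_le (n w : Int) (t : List Int) (R : Int → Nat)
    (h : w + 1 < n + 1 ∧ 0 < R (w + 1)) : 1 + pvM n t (pvDec R (w + 1)) ≤ pvM n (w :: t) R := by
  rw [pvM_cons, if_pos h]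
  exact le_trans (le_max_right _ _) (le_max_right _ _)

theorem pvM_cons_le {n w : Int} {t : List Int} {R : Int → Nat} {B : Nat}
    (h0 : pvM n t R ≤ B)
    (h1 : 0 < w - 1 ∧ 0 < R (w - 1) → 1 + pvM n t (pvDec R (w - 1)) ≤ B)
    (h2 : w + 1 < n + 1 ∧ 0 < R (w + 1) → 1 + pvM n t (pvDec R (w + 1)) ≤ B) :
    pvM n (w :: t) R ≤ B := by
  rw [pvM_cons]
  apply max_le h0
  apply max_le
  · split_ifs with h; exact h1 h; omega
  · split_ifs with h; exact h2 h; omega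

-- generic "take" lemma: student w takes reserve value x it can use
theorem pvM_take_le (n w : Int) (t : List Int) (R : Int → Nat) (x : Int)
    (hu : pvUsable n w x) (hx : 0 < R x) : 1 + pvM n t (pvDec R x) ≤ pvM n (w :: t) R := by
  rcases hu with ⟨hx1, hx2⟩ | ⟨hx1, hx2⟩
  · subst hx1; exact pvM_take_f_le n w t R ⟨hx2, hx⟩
  · subst hx1; exact pvM_take_l_le n w t R ⟨hx2, hx⟩

theorem pvM_dec_le (n : Int) (L : List Int) (R : Int → Nat) (x : Int) :
    pvM n L R ≤ 1 + pvM n L (pvDec R x) := by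
  induction L generalizing R with
  | nil => simp [pvM_nil]
  | cons h t ih =>
    apply pvM_cons_le
    · exact le_trans (ih R) (by exact Nat.add_le_add_left (pvM_skip_le n h t _) 1)
    · rintro ⟨h1, h2⟩
      by_cases hv : h - 1 = x
      · subst hv
        exact Nat.add_le_add_left (pvM_skip_le n h t _) 1
      · have step : pvM n t (pvDec R (h - 1)) ≤ 1 + pvM n t (pvDec (pvDec R (h - 1)) x) := ih _
        rw [pvDec_comm] at step
        have htake : 1 + pvM n t (pvDec (pvDec R x) (h - 1)) ≤ pvM n (h :: t) (pvDec R x) := by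
          apply pvM_take_f_le
          constructor
          · exact h1
          · simpa [pvDec, hv] using h2
        omega
    · rintro ⟨h1, h2⟩
      by_cases hv : h + 1 = x
      · subst hv
        exact Nat.add_le_add_left (pvM_skip_le n h t _) 1
      · have step : pvM n t (pvDec R (h + 1)) ≤ 1 + pvM n t (pvDec (pvDec R (h + 1)) x) := ih _
        rw [pvDec_comm] at step
        have htake : 1 + pvM n t (pvDec (pvDec R x) (h + 1)) ≤ pvM n (h :: t) (pvDec R x) := by
          apply pvM_take_l_le
          constructor
          · exact h1
          · simpa [pvDec, hv] using h2
        omega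

theorem pvDec_eval_ne (R : Int → Nat) (x v : Int) (h : ¬ v = x) : pvDec R x v = R v := if_neg h
theorem pvDec_eval_self (R : Int → Nat) (x : Int) : pvDec R x x = R x - 1 := if_pos rfl
theorem pvDec_pos_other (R : Int → Nat) (x v : Int) (h : 0 < pvDec R x v) : 0 < R v :=
  lt_of_lt_of_le h (pvDec_le R x v)

theorem pvM_dom (n : Int) (L : List Int) (R : Int → Nat) (x y : Int)
    (hu : ∀ w ∈ L, pvUsable n w y → pvUsable n w x) (hx : 0 < R x) (hy : 0 < R y) :
    pvM n L (pvDec R x) ≤ pvM n L (pvDec R y) := by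
  by_cases hxy : x = y
  · subst hxy; exact le_refl _
  revert hu hx hy
  induction L generalizing R with
  | nil => intro _ _ _; simp [pvM_nil]
  | cons h t ih =>
    intro hu hx hy
    apply pvM_cons_le
    · exact le_trans (ih R (fun w hw => hu w (List.mem_cons_of_mem h hw)) hx hy)
        (pvM_skip_le n h t _)
    · rintro ⟨h1, h2⟩
      by_cases hvy : h - 1 = y
      · have huy : pvUsable n h y := Or.inl ⟨hvy.symm, hvy ▸ h1⟩
        have hux : pvUsable n h x := hu h (List.mem_cons_self) huy
        have : 1 + pvM n t (pvDec (pvDec R y) x) ≤ pvM n (h :: t) (pvDec R y) := by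
          apply pvM_take_le n h t _ x hux
          simp [pvDec, hxy]; omega
        rw [pvDec_comm] at this
        rw [hvy]
        exact this
      · have hval : 0 < pvDec R y (h - 1) := by
          rw [pvDec_eval_ne R y _ hvy]
          exact pvDec_pos_other R x _ h2
        have hR2x : 0 < pvDec R (h - 1) x := by
          rcases eq_or_ne x (h - 1) with hh | hh
          · rw [hh, pvDec_eval_self]
            rw [← hh] at h2 ⊢
            rw [pvDec_eval_self] at h2
            exact h2
          · rw [pvDec_eval_ne R _ x hh]
            exact hx
        have hR2y : 0 < pvDec R (h - 1) y := by
          rw [pvDec_eval_ne R _ y (fun hh => hvy hh.symm)]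
          exact hy
        have step := ih (pvDec R (h - 1)) (fun w hw => hu w (List.mem_cons_of_mem h hw)) hR2x hR2y
        have htake : 1 + pvM n t (pvDec (pvDec R (h - 1)) y) ≤ pvM n (h :: t) (pvDec R y) := by
          rw [pvDec_comm]
          exact pvM_take_f_le n h t _ ⟨h1, hval⟩
        rw [pvDec_comm (R := R) (x := x) (y := h - 1)]
        omega
    · rintro ⟨h1, h2⟩
      by_cases hvy : h + 1 = y
      · have huy : pvUsable n h y := Or.inr ⟨hvy.symm, hvy ▸ h1⟩
        have hux : pvUsable n h x := hu h (List.mem_cons_self) huy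
        have : 1 + pvM n t (pvDec (pvDec R y) x) ≤ pvM n (h :: t) (pvDec R y) := by
          apply pvM_take_le n h t _ x hux
          simp [pvDec, hxy]; omega
        rw [pvDec_comm] at this
        rw [hvy]
        exact this
      · have hval : 0 < pvDec R y (h + 1) := by
          rw [pvDec_eval_ne R y _ hvy]
          exact pvDec_pos_other R x _ h2
        have hR2x : 0 < pvDec R (h + 1) x := by
          rcases eq_or_ne x (h + 1) with hh | hh
          · rw [hh, pvDec_eval_self]
            rw [← hh] at h2 ⊢
            rw [pvDec_eval_self] at h2
            exact h2
          · rw [pvDec_eval_ne R _ x hh]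
            exact hx
        have hR2y : 0 < pvDec R (h + 1) y := by
          rw [pvDec_eval_ne R _ y (fun hh => hvy hh.symm)]
          exact hy
        have step := ih (pvDec R (h + 1)) (fun w hw => hu w (List.mem_cons_of_mem h hw)) hR2x hR2y
        have htake : 1 + pvM n t (pvDec (pvDec R (h + 1)) y) ≤ pvM n (h :: t) (pvDec R y) := by
          rw [pvDec_comm]
          exact pvM_take_l_le n h t _ ⟨h1, hval⟩
        rw [pvDec_comm (R := R) (x := x) (y := h + 1)]
        omega

theorem pvDec_cross (R : Int → Nat) (u v : Int) (h : 0 < pvDec R u v) (hu : 0 < R u) :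
    0 < pvDec R v u := by
  rcases eq_or_ne v u with he | hne
  · subst he; exact h
  · rw [pvDec_eval_ne R v u (fun hh => hne hh.symm)]; exact hu

theorem pvM_cons_le1 {n w : Int} {t : List Int} {R : Int → Nat} {B : Nat}
    (h0 : 1 + pvM n t R ≤ B)
    (h1 : 0 < w - 1 ∧ 0 < R (w - 1) → 2 + pvM n t (pvDec R (w - 1)) ≤ B)
    (h2 : w + 1 < n + 1 ∧ 0 < R (w + 1) → 2 + pvM n t (pvDec R (w + 1)) ≤ B) :
    1 + pvM n (w :: t) R ≤ B := by
  rw [pvM_cons]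
  by_cases c1 : 0 < w - 1 ∧ 0 < R (w - 1) <;> by_cases c2 : w + 1 < n + 1 ∧ 0 < R (w + 1)
  · rw [if_pos c1, if_pos c2]; have a1 := h1 c1; have a2 := h2 c2; omega
  · rw [if_pos c1, if_neg c2]; have a1 := h1 c1; omega
  · rw [if_neg c1, if_pos c2]; have a2 := h2 c2; omega
  · rw [if_neg c1, if_neg c2]; omega

theorem pvM_two_take (n a b : Int) (t : List Int) (R : Int → Nat) (za zb : Int)
    (ha : pvUsable n a za) (hb : pvUsable n b zb)
    (hza : 0 < R za) (hzb : 0 < pvDec R za zb) :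
    2 + pvM n t (pvDec (pvDec R za) zb) ≤ pvM n (b :: a :: t) R := by
  have hzb' : 0 < R zb := pvDec_pos_other R za zb hzb
  have hza' : 0 < pvDec R zb za := pvDec_cross R za zb hzb hza
  have t1 : 1 + pvM n t (pvDec (pvDec R zb) za) ≤ pvM n (a :: t) (pvDec R zb) :=
    pvM_take_le n a t _ za ha hza'
  have t2 : 1 + pvM n (a :: t) (pvDec R zb) ≤ pvM n (b :: a :: t) R :=
    pvM_take_le n b (a :: t) R zb hb hzb'
  have e : pvDec (pvDec R za) zb = pvDec (pvDec R zb) za := pvDec_comm R za zb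
  rw [e]; omega

theorem pvM_swap_le (n a b : Int) (t : List Int) (R : Int → Nat) :
    pvM n (a :: b :: t) R ≤ pvM n (b :: a :: t) R := by
  apply pvM_cons_le
  · -- skip a
    apply pvM_cons_le
    · exact le_trans (pvM_skip_le n a t R) (pvM_skip_le n b (a :: t) R)
    · intro c
      have h1 : 1 + pvM n t (pvDec R (b - 1)) ≤ 1 + pvM n (a :: t) (pvDec R (b - 1)) := by
        have := pvM_skip_le n a t (pvDec R (b - 1)); omega
      exact le_trans h1 (pvM_take_f_le n b (a :: t) R c)
    · intro c
      have h1 : 1 + pvM n t (pvDec R (b + 1)) ≤ 1 + pvM n (a :: t) (pvDec R (b + 1)) := by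
        have := pvM_skip_le n a t (pvDec R (b + 1)); omega
      exact le_trans h1 (pvM_take_l_le n b (a :: t) R c)
  · -- a takes a-1
    intro c
    have ha : pvUsable n a (a - 1) := Or.inl ⟨rfl, c.1⟩
    apply pvM_cons_le1
    · have h1 : 1 + pvM n t (pvDec R (a - 1)) ≤ pvM n (a :: t) R :=
        pvM_take_le n a t R _ ha c.2
      have := pvM_skip_le n b (a :: t) R; omega
    · intro c2
      exact pvM_two_take n a b t R (a - 1) (b - 1) ha (Or.inl ⟨rfl, c2.1⟩) c.2 c2.2
    · intro c2
      exact pvM_two_take n a b t R (a - 1) (b + 1) ha (Or.inr ⟨rfl, c2.1⟩) c.2 c2.2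
  · -- a takes a+1
    intro c
    have ha : pvUsable n a (a + 1) := Or.inr ⟨rfl, c.1⟩
    apply pvM_cons_le1
    · have h1 : 1 + pvM n t (pvDec R (a + 1)) ≤ pvM n (a :: t) R :=
        pvM_take_le n a t R _ ha c.2
      have := pvM_skip_le n b (a :: t) R; omega
    · intro c2
      exact pvM_two_take n a b t R (a + 1) (b - 1) ha (Or.inl ⟨rfl, c2.1⟩) c.2 c2.2
    · intro c2
      exact pvM_two_take n a b t R (a + 1) (b + 1) ha (Or.inr ⟨rfl, c2.1⟩) c.2 c2.2

theorem pvM_perm (n : Int) {L L' : List Int} (h : L.Perm L') : ∀ R, pvM n L R = pvM n L' R := by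
  induction h with
  | nil => intro R; rfl
  | cons x h ih =>
    intro R
    simp only [pvM_cons]
    rw [ih, ih, ih]
  | swap x y l =>
    intro R
    exact le_antisymm (pvM_swap_le n y x l R) (pvM_swap_le n x y l R)
  | trans h1 h2 ih1 ih2 => intro R; rw [ih1, ih2]

theorem pvM_front (n : Int) (L : List Int) (R : Int → Nat) (w : Int) (hw : w ∈ L) :
    pvM n L R = pvM n (w :: L.erase w) R :=
  pvM_perm n (List.perm_cons_erase hw) R

theorem pvM_act_a (n : Int) (L : List Int) (R : Int → Nat) (w : Int) (hw : w ∈ L)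
    (hf : ¬(0 < w - 1 ∧ 0 < R (w - 1))) (hl : ¬(w + 1 < n + 1 ∧ 0 < R (w + 1))) :
    pvM n L R = pvM n (L.erase w) R := by
  rw [pvM_front n L R w hw, pvM_cons, if_neg hf, if_neg hl]
  omega

theorem pvM_act_b (n : Int) (L : List Int) (R : Int → Nat) (w : Int) (hw : w ∈ L)
    (hf : 0 < w - 1 ∧ 0 < R (w - 1)) (hl : ¬(w + 1 < n + 1 ∧ 0 < R (w + 1))) :
    pvM n L R = 1 + pvM n (L.erase w) (pvDec R (w - 1)) := by
  rw [pvM_front n L R w hw, pvM_cons, if_pos hf, if_neg hl]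
  have := pvM_dec_le n (L.erase w) R (w - 1)
  omega

theorem pvM_act_c (n : Int) (L : List Int) (R : Int → Nat) (w : Int) (hw : w ∈ L)
    (hf : ¬(0 < w - 1 ∧ 0 < R (w - 1))) (hl : w + 1 < n + 1 ∧ 0 < R (w + 1)) :
    pvM n L R = 1 + pvM n (L.erase w) (pvDec R (w + 1)) := by
  rw [pvM_front n L R w hw, pvM_cons, if_neg hf, if_pos hl]
  have := pvM_dec_le n (L.erase w) R (w + 1)
  omega

theorem pvM_act_greedy (n : Int) (L : List Int) (R : Int → Nat) (w : Int) (hw : w ∈ L)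
    (hmin : ∀ u ∈ L, w ≤ u) (hf : 0 < w - 1 ∧ 0 < R (w - 1)) :
    pvM n L R = 1 + pvM n (L.erase w) (pvDec R (w - 1)) := by
  by_cases hl : w + 1 < n + 1 ∧ 0 < R (w + 1)
  · rw [pvM_front n L R w hw, pvM_cons, if_pos hf, if_pos hl]
    have hdom : pvM n (L.erase w) (pvDec R (w + 1)) ≤ pvM n (L.erase w) (pvDec R (w - 1)) := by
      apply pvM_dom n (L.erase w) R (w + 1) (w - 1) _ hl.2 hf.2
      intro u hu hus
      have hum : u ∈ L := List.mem_of_mem_erase hu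
      have hge := hmin u hum
      rcases hus with ⟨e, p⟩ | ⟨e, p⟩
      · have : u = w := by omega
        exact Or.inr ⟨by omega, hl.1⟩
      · exact absurd e (by omega)
    have := pvM_dec_le n (L.erase w) R (w - 1)
    omega
  · exact pvM_act_b n L R w hw hf hl

theorem pvM_act_d (n : Int) (L : List Int) (R : Int → Nat) (r : Int)
    (hK : ∀ u ∈ L, 1 < u ∧ u < n) (hm : r - 1 ∈ L) (hr : 0 < R r)
    (hl : ¬(r + 1 < n + 1 ∧ r + 1 ∈ L)) :
    pvM n L R = 1 + pvM n (L.erase (r - 1)) (pvDec R r) := by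
  have e1 : r - 1 - 1 = r - 2 := by ring
  have e2 : r - 1 + 1 = r := by ring
  have hlat : r - 1 + 1 < n + 1 ∧ 0 < R (r - 1 + 1) := by
    rw [e2]; exact ⟨by have := (hK _ hm).2; omega, hr⟩
  rw [pvM_front n L R (r - 1) hm, pvM_cons, if_pos hlat, e2]
  by_cases hfc : 0 < r - 1 - 1 ∧ 0 < R (r - 1 - 1)
  · rw [if_pos hfc, e1]
    rw [e1] at hfc
    have hdom : pvM n (L.erase (r - 1)) (pvDec R (r - 2)) ≤ pvM n (L.erase (r - 1)) (pvDec R r) := by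
      apply pvM_dom n _ R (r - 2) r _ hfc.2 hr
      intro u hu hus
      have hum : u ∈ L := List.mem_of_mem_erase hu
      rcases hus with ⟨e, p⟩ | ⟨e, p⟩
      · have : u = r + 1 := by omega
        exact absurd ⟨by have := (hK u hum).2; omega, this ▸ hum⟩ hl
      · exact Or.inl ⟨by omega, by have := (hK u hum).1; omega⟩
    have := pvM_dec_le n (L.erase (r - 1)) R r
    omega
  · rw [if_neg hfc]
    have := pvM_dec_le n (L.erase (r - 1)) R r
    omega

theorem pvM_act_e (n : Int) (L : List Int) (R : Int → Nat) (r : Int)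
    (hK : ∀ u ∈ L, 1 < u ∧ u < n) (hm : r + 1 ∈ L) (hr : 0 < R r)
    (hf : ¬(r - 1 > 0 ∧ r - 1 ∈ L)) :
    pvM n L R = 1 + pvM n (L.erase (r + 1)) (pvDec R r) := by
  have e1 : r + 1 - 1 = r := by ring
  have e2 : r + 1 + 1 = r + 2 := by ring
  have hfor : 0 < r + 1 - 1 ∧ 0 < R (r + 1 - 1) := by
    rw [e1]; exact ⟨by have := (hK _ hm).1; omega, hr⟩
  rw [pvM_front n L R (r + 1) hm, pvM_cons, if_pos hfor, e1]
  by_cases hlc : r + 1 + 1 < n + 1 ∧ 0 < R (r + 1 + 1)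
  · rw [if_pos hlc, e2]
    rw [e2] at hlc
    have hdom : pvM n (L.erase (r + 1)) (pvDec R (r + 2)) ≤ pvM n (L.erase (r + 1)) (pvDec R r) := by
      apply pvM_dom n _ R (r + 2) r _ hlc.2 hr
      intro u hu hus
      have hum : u ∈ L := List.mem_of_mem_erase hu
      rcases hus with ⟨e, p⟩ | ⟨e, p⟩
      · have : u = r + 1 := by omega
        exact Or.inr ⟨by omega, by have := (hK u hum).2; omega⟩
      · have : u = r - 1 := by omega
        exact absurd ⟨by have := (hK u hum).1; omega, this ▸ hum⟩ hf
    have := pvM_dec_le n (L.erase (r + 1)) R r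
    omega
  · rw [if_neg hlc]
    have := pvM_dec_le n (L.erase (r + 1)) R r
    omega

-- ===== operational layer =====
theorem list_exists_min (l : List Int) (h : l ≠ []) : ∃ m ∈ l, ∀ b ∈ l, m ≤ b := by
  rcases hm : l.min? with _ | m
  · rw [List.min?_eq_none_iff] at hm; exact absurd hm h
  · rcases List.min?_eq_some_iff.mp hm with ⟨h1, h2⟩
    exact ⟨m, h1, h2⟩

theorem pvCond_iff (c : Prop) [Decidable c] (l : List Int) (u : Int) :
    (decide c && l.contains u) = true ↔ c ∧ 0 < pvCnt l u := by
  simp [pvCnt, List.count_pos_iff]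

theorem pvCnt_erase (l : List Int) (v : Int) (h : 0 < pvCnt l v) :
    pvCnt (l.erase v) = pvDec (pvCnt l) v := by
  funext u
  simp only [pvCnt, pvDec, List.count_erase]
  split_ifs with h1 h2 h2 <;> simp_all <;> omega

theorem pvMem_of_cnt (l : List Int) (v : Int) (h : 0 < pvCnt l v) : v ∈ l :=
  List.count_pos_iff.mp h

theorem pvCnt_cons_le {s L : List Int} {w : Int}
    (hs : ∀ v, (w :: s).count v ≤ L.count v) (hw : w ∈ L) :
    ∀ v, s.count v ≤ (L.erase w).count v := by
  intro v
  have h0 := hs v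
  rw [List.count_erase]
  rcases eq_or_ne v w with he | hne
  · subst he
    simp only [List.count_cons_self] at h0
    simp only [beq_self_eq_true, if_pos]
    omega
  · simp only [List.count_cons, beq_iff_eq] at h0
    rw [if_neg (fun hh : w = v => hne hh.symm)] at h0
    simp only [beq_iff_eq]
    rw [if_neg (fun hh : w = v => hne hh.symm)]
    omega

theorem pvCnt_tail_le {s L : List Int} {w : Int}
    (hs : ∀ v, (w :: s).count v ≤ L.count v) :
    ∀ v, s.count v ≤ L.count v := by
  intro v
  have h0 := hs v
  rcases eq_or_ne v w with he | hne
  · subst he; simp only [List.count_cons_self] at h0; omega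
  · simp only [List.count_cons, beq_iff_eq] at h0
    rw [if_neg (fun hh : w = v => hne hh.symm)] at h0
    omega

theorem pvCnt_erase_le (L : List Int) (w : Int) : ∀ v, (L.erase w).count v ≤ L.count v := by
  intro v; rw [List.count_erase]; split_ifs <;> omega

-- the lost pass: preserves answer + pvM, shrinks both lists (counts), and empties
-- every out-of-range lost value that appears in the snapshot
theorem pvLostPass_inv (n : Int) (s : List Int) : ∀ (L Rl : List Int) (a : Int),
    (∀ v, s.count v ≤ L.count v) →
    ((pvLostPass n s (L, Rl, a)).2.2 + (pvM n (pvLostPass n s (L, Rl, a)).1 (pvCnt (pvLostPass n s (L, Rl, a)).2.1) : Int)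
        = a + (pvM n L (pvCnt Rl) : Int))
    ∧ (∀ v, (pvLostPass n s (L, Rl, a)).1.count v ≤ L.count v)
    ∧ (∀ v, (pvLostPass n s (L, Rl, a)).2.1.count v ≤ Rl.count v)
    ∧ (∀ v, ¬(1 < v ∧ v < n) → (pvLostPass n s (L, Rl, a)).1.count v ≤ L.count v - s.count v) := by
  induction s with
  | nil =>
    intro L Rl a _
    exact ⟨by simp [pvLostPass], fun v => le_refl _, fun v => le_refl _, fun v _ => by simp [pvLostPass]⟩
  | cons w s ih =>
    intro L Rl a hs
    have hwL : w ∈ L := by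
      have h1 := hs w
      simp only [List.count_cons_self] at h1
      exact List.count_pos_iff.mp (by omega)
    by_cases Pf : (0 < w - 1 ∧ 0 < pvCnt Rl (w - 1)) <;>
      by_cases Pl : (w + 1 < n + 1 ∧ 0 < pvCnt Rl (w + 1))
    · -- skip (both available)
      have hb1 : (decide (w - 1 > 0) && Rl.contains (w - 1)) = true := (pvCond_iff _ _ _).mpr Pf
      have hb2 : (decide (w + 1 < n + 1) && Rl.contains (w + 1)) = true := (pvCond_iff _ _ _).mpr Pl
      have hstep : pvLostPass n (w :: s) (L, Rl, a) = pvLostPass n s (L, Rl, a) := by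
        simp only [pvLostPass, hb1, hb2]; rfl
      rw [hstep]
      obtain ⟨i1, i2, i3, i4⟩ := ih L Rl a (pvCnt_tail_le hs)
      refine ⟨i1, i2, i3, fun v hv => ?_⟩
      have hvw : v ≠ w := by rintro rfl; exact hv ⟨by omega, by omega⟩
      simp only [List.count_cons, beq_iff_eq]
      rw [if_neg (fun hh : w = v => hvw hh.symm)]
      have := i4 v hv
      omega
    · -- branch b : former only
      have hb1 : (decide (w - 1 > 0) && Rl.contains (w - 1)) = true := (pvCond_iff _ _ _).mpr Pf
      have hb2 : (decide (w + 1 < n + 1) && Rl.contains (w + 1)) = false := by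
        rw [← Bool.not_eq_true]; intro hc; exact Pl ((pvCond_iff _ _ _).mp hc)
      have hstep : pvLostPass n (w :: s) (L, Rl, a)
          = pvLostPass n s (L.erase w, Rl.erase (w - 1), a + 1) := by
        simp only [pvLostPass, hb1, hb2]; rfl
      rw [hstep]
      obtain ⟨i1, i2, i3, i4⟩ := ih (L.erase w) (Rl.erase (w - 1)) (a + 1) (pvCnt_cons_le hs hwL)
      have hM : pvM n L (pvCnt Rl) = 1 + pvM n (L.erase w) (pvCnt (Rl.erase (w - 1))) := by
        rw [pvCnt_erase Rl (w - 1) Pf.2]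
        exact pvM_act_b n L (pvCnt Rl) w hwL Pf Pl
      refine ⟨by rw [i1, hM]; push_cast; ring, ?_, ?_, ?_⟩
      · exact fun v => le_trans (i2 v) (pvCnt_erase_le L w v)
      · exact fun v => le_trans (i3 v) (pvCnt_erase_le Rl (w - 1) v)
      · intro v hv
        have h4 := i4 v hv
        have h0 := pvCnt_erase_le L w v
        rw [List.count_erase] at h4
        rcases eq_or_ne v w with he | hne
        · subst he
          simp only [List.count_cons_self]
          simp at h4
          omega
        · simp only [List.count_cons, beq_iff_eq]
          rw [if_neg (fun hh : w = v => hne hh.symm)]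
          simp only [beq_iff_eq] at h4
          rw [if_neg (fun hh : w = v => hne hh.symm)] at h4
          omega
    · -- branch c : latter only
      have hb1 : (decide (w - 1 > 0) && Rl.contains (w - 1)) = false := by
        rw [← Bool.not_eq_true]; intro hc; exact Pf ((pvCond_iff _ _ _).mp hc)
      have hb2 : (decide (w + 1 < n + 1) && Rl.contains (w + 1)) = true := (pvCond_iff _ _ _).mpr Pl
      have hstep : pvLostPass n (w :: s) (L, Rl, a)
          = pvLostPass n s (L.erase w, Rl.erase (w + 1), a + 1) := by
        simp only [pvLostPass, hb1, hb2]; rfl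
      rw [hstep]
      obtain ⟨i1, i2, i3, i4⟩ := ih (L.erase w) (Rl.erase (w + 1)) (a + 1) (pvCnt_cons_le hs hwL)
      have hM : pvM n L (pvCnt Rl) = 1 + pvM n (L.erase w) (pvCnt (Rl.erase (w + 1))) := by
        rw [pvCnt_erase Rl (w + 1) Pl.2]
        exact pvM_act_c n L (pvCnt Rl) w hwL Pf Pl
      refine ⟨by rw [i1, hM]; push_cast; ring, ?_, ?_, ?_⟩
      · exact fun v => le_trans (i2 v) (pvCnt_erase_le L w v)
      · exact fun v => le_trans (i3 v) (pvCnt_erase_le Rl (w + 1) v)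
      · intro v hv
        have h4 := i4 v hv
        rw [List.count_erase] at h4
        rcases eq_or_ne v w with he | hne
        · subst he
          simp only [List.count_cons_self]
          simp at h4
          omega
        · simp only [List.count_cons, beq_iff_eq]
          rw [if_neg (fun hh : w = v => hne hh.symm)]
          simp only [beq_iff_eq] at h4
          rw [if_neg (fun hh : w = v => hne hh.symm)] at h4
          omega
    · -- branch a : none available, drop w
      have hb1 : (decide (w - 1 > 0) && Rl.contains (w - 1)) = false := by
        rw [← Bool.not_eq_true]; intro hc; exact Pf ((pvCond_iff _ _ _).mp hc)
      have hb2 : (decide (w + 1 < n + 1) && Rl.contains (w + 1)) = false := by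
        rw [← Bool.not_eq_true]; intro hc; exact Pl ((pvCond_iff _ _ _).mp hc)
      have hstep : pvLostPass n (w :: s) (L, Rl, a) = pvLostPass n s (L.erase w, Rl, a) := by
        simp only [pvLostPass, hb1, hb2]; rfl
      rw [hstep]
      obtain ⟨i1, i2, i3, i4⟩ := ih (L.erase w) Rl a (pvCnt_cons_le hs hwL)
      have hM : pvM n L (pvCnt Rl) = pvM n (L.erase w) (pvCnt Rl) :=
        pvM_act_a n L (pvCnt Rl) w hwL Pf Pl
      refine ⟨by rw [i1, hM], ?_, i3, ?_⟩
      · exact fun v => le_trans (i2 v) (pvCnt_erase_le L w v)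
      · intro v hv
        have h4 := i4 v hv
        rw [List.count_erase] at h4
        rcases eq_or_ne v w with he | hne
        · subst he
          simp only [List.count_cons_self]
          simp at h4
          omega
        · simp only [List.count_cons, beq_iff_eq]
          rw [if_neg (fun hh : w = v => hne hh.symm)]
          simp only [beq_iff_eq] at h4
          rw [if_neg (fun hh : w = v => hne hh.symm)] at h4
          omega

theorem pvLostPass_len (n : Int) (s : List Int) : ∀ (L Rl : List Int) (a : Int),
    (pvLostPass n s (L, Rl, a)).1.length ≤ L.length := by
  induction s with
  | nil => intro L Rl a; exact le_refl _
  | cons w s ih =>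
    intro L Rl a
    simp only [pvLostPass]
    split_ifs
    · exact le_trans (ih _ _ _) List.erase_sublist.length_le
    · exact le_trans (ih _ _ _) List.erase_sublist.length_le
    · exact le_trans (ih _ _ _) List.erase_sublist.length_le
    · exact ih _ _ _

theorem pvResPass_len (n : Int) (s : List Int) : ∀ (L Rl : List Int) (a : Int),
    (pvResPass n s (L, Rl, a)).1.length ≤ L.length := by
  induction s with
  | nil => intro L Rl a; exact le_refl _
  | cons w s ih =>
    intro L Rl a
    simp only [pvResPass]
    split_ifs
    · exact le_trans (ih _ _ _) List.erase_sublist.length_le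
    · exact le_trans (ih _ _ _) List.erase_sublist.length_le
    · exact ih _ _ _

theorem pvLostPass_stall (n : Int) (s : List Int) : ∀ (L Rl : List Int) (a : Int),
    (∀ v, s.count v ≤ L.count v) →
    (pvLostPass n s (L, Rl, a)).1.length = L.length →
    pvLostPass n s (L, Rl, a) = (L, Rl, a)
      ∧ (∀ w ∈ s, (0 < w - 1 ∧ 0 < pvCnt Rl (w - 1)) ∧ (w + 1 < n + 1 ∧ 0 < pvCnt Rl (w + 1))) := by
  induction s with
  | nil => intro L Rl a _ _; exact ⟨rfl, fun w hw => absurd hw (List.not_mem_nil)⟩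
  | cons w s ih =>
    intro L Rl a hs hlen
    have hwL : w ∈ L := by
      have h1 := hs w
      simp only [List.count_cons_self] at h1
      exact List.count_pos_iff.mp (by omega)
    have herase : (L.erase w).length = L.length - 1 := List.length_erase_of_mem hwL
    have hpos : 0 < L.length := List.length_pos_of_mem hwL
    by_cases Pf : (0 < w - 1 ∧ 0 < pvCnt Rl (w - 1)) <;>
      by_cases Pl : (w + 1 < n + 1 ∧ 0 < pvCnt Rl (w + 1))
    · have hb1 : (decide (w - 1 > 0) && Rl.contains (w - 1)) = true := (pvCond_iff _ _ _).mpr Pf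
      have hb2 : (decide (w + 1 < n + 1) && Rl.contains (w + 1)) = true := (pvCond_iff _ _ _).mpr Pl
      have hstep : pvLostPass n (w :: s) (L, Rl, a) = pvLostPass n s (L, Rl, a) := by
        simp only [pvLostPass, hb1, hb2]; rfl
      rw [hstep] at hlen ⊢
      obtain ⟨e1, e2⟩ := ih L Rl a (pvCnt_tail_le hs) hlen
      refine ⟨e1, fun u hu => ?_⟩
      rcases List.mem_cons.mp hu with he | hu'
      · subst he; exact ⟨Pf, Pl⟩
      · exact e2 u hu'
    · have hb1 : (decide (w - 1 > 0) && Rl.contains (w - 1)) = true := (pvCond_iff _ _ _).mpr Pf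
      have hb2 : (decide (w + 1 < n + 1) && Rl.contains (w + 1)) = false := by
        rw [← Bool.not_eq_true]; intro hc; exact Pl ((pvCond_iff _ _ _).mp hc)
      have hstep : pvLostPass n (w :: s) (L, Rl, a)
          = pvLostPass n s (L.erase w, Rl.erase (w - 1), a + 1) := by
        simp only [pvLostPass, hb1, hb2]; rfl
      rw [hstep] at hlen
      have := pvLostPass_len n s (L.erase w) (Rl.erase (w - 1)) (a + 1)
      omega
    · have hb1 : (decide (w - 1 > 0) && Rl.contains (w - 1)) = false := by
        rw [← Bool.not_eq_true]; intro hc; exact Pf ((pvCond_iff _ _ _).mp hc)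
      have hb2 : (decide (w + 1 < n + 1) && Rl.contains (w + 1)) = true := (pvCond_iff _ _ _).mpr Pl
      have hstep : pvLostPass n (w :: s) (L, Rl, a)
          = pvLostPass n s (L.erase w, Rl.erase (w + 1), a + 1) := by
        simp only [pvLostPass, hb1, hb2]; rfl
      rw [hstep] at hlen
      have := pvLostPass_len n s (L.erase w) (Rl.erase (w + 1)) (a + 1)
      omega
    · have hb1 : (decide (w - 1 > 0) && Rl.contains (w - 1)) = false := by
        rw [← Bool.not_eq_true]; intro hc; exact Pf ((pvCond_iff _ _ _).mp hc)
      have hb2 : (decide (w + 1 < n + 1) && Rl.contains (w + 1)) = false := by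
        rw [← Bool.not_eq_true]; intro hc; exact Pl ((pvCond_iff _ _ _).mp hc)
      have hstep : pvLostPass n (w :: s) (L, Rl, a) = pvLostPass n s (L.erase w, Rl, a) := by
        simp only [pvLostPass, hb1, hb2]; rfl
      rw [hstep] at hlen
      have := pvLostPass_len n s (L.erase w) Rl a
      omega

-- the reserve pass preserves answer + pvM, given that every lost student is strictly
-- inside the range (the invariant the preceding lost pass establishes)
theorem pvResPass_inv (n : Int) (s : List Int) : ∀ (L Rl : List Int) (a : Int),
    (∀ v, s.count v ≤ Rl.count v) → (∀ u ∈ L, 1 < u ∧ u < n) →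
    ((pvResPass n s (L, Rl, a)).2.2 + (pvM n (pvResPass n s (L, Rl, a)).1 (pvCnt (pvResPass n s (L, Rl, a)).2.1) : Int)
        = a + (pvM n L (pvCnt Rl) : Int)) := by
  induction s with
  | nil => intro L Rl a _ _; simp [pvResPass]
  | cons w s ih =>
    intro L Rl a hs hK
    have hwR : w ∈ Rl := by
      have h1 := hs w
      simp only [List.count_cons_self] at h1
      exact List.count_pos_iff.mp (by omega)
    have hwRc : 0 < pvCnt Rl w := List.count_pos_iff.mpr hwR
    by_cases Pf : (w - 1 > 0 ∧ w - 1 ∈ L) <;> by_cases Pl : (w + 1 < n + 1 ∧ w + 1 ∈ L)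
    · -- both neighbours lost: skip
      have hb1 : (decide (w - 1 > 0) && L.contains (w - 1)) = true := by
        simp only [Bool.and_eq_true, decide_eq_true_eq, List.contains_iff_mem]
        exact ⟨Pf.1, Pf.2⟩
      have hb2 : (decide (w + 1 < n + 1) && L.contains (w + 1)) = true := by
        simp only [Bool.and_eq_true, decide_eq_true_eq, List.contains_iff_mem]
        exact ⟨Pl.1, Pl.2⟩
      have hstep : pvResPass n (w :: s) (L, Rl, a) = pvResPass n s (L, Rl, a) := by
        simp only [pvResPass, hb1, hb2]; rfl
      rw [hstep]
      exact ih L Rl a (pvCnt_tail_le hs) hK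
    · -- branch d : give to former
      have hb1 : (decide (w - 1 > 0) && L.contains (w - 1)) = true := by
        simp only [Bool.and_eq_true, decide_eq_true_eq, List.contains_iff_mem]
        exact ⟨Pf.1, Pf.2⟩
      have hb2 : (decide (w + 1 < n + 1) && L.contains (w + 1)) = false := by
        rw [← Bool.not_eq_true]
        simp only [Bool.and_eq_true, decide_eq_true_eq, List.contains_iff_mem]
        rintro ⟨h1, h2⟩; exact Pl ⟨h1, h2⟩
      have hstep : pvResPass n (w :: s) (L, Rl, a)
          = pvResPass n s (L.erase (w - 1), Rl.erase w, a + 1) := by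
        simp only [pvResPass, hb1, hb2]; rfl
      rw [hstep]
      have hM : pvM n L (pvCnt Rl) = 1 + pvM n (L.erase (w - 1)) (pvCnt (Rl.erase w)) := by
        rw [pvCnt_erase Rl w hwRc]
        exact pvM_act_d n L (pvCnt Rl) w hK Pf.2 hwRc Pl
      have hK' : ∀ u ∈ L.erase (w - 1), 1 < u ∧ u < n :=
        fun u hu => hK u (List.mem_of_mem_erase hu)
      have := ih (L.erase (w - 1)) (Rl.erase w) (a + 1) (pvCnt_cons_le hs hwR) hK'
      rw [this, hM]; push_cast; ring
    · -- branch e : give to latter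
      have hb1 : (decide (w - 1 > 0) && L.contains (w - 1)) = false := by
        rw [← Bool.not_eq_true]
        simp only [Bool.and_eq_true, decide_eq_true_eq, List.contains_iff_mem]
        rintro ⟨h1, h2⟩; exact Pf ⟨h1, h2⟩
      have hb2 : (decide (w + 1 < n + 1) && L.contains (w + 1)) = true := by
        simp only [Bool.and_eq_true, decide_eq_true_eq, List.contains_iff_mem]
        exact ⟨Pl.1, Pl.2⟩
      have hstep : pvResPass n (w :: s) (L, Rl, a)
          = pvResPass n s (L.erase (w + 1), Rl.erase w, a + 1) := by
        simp only [pvResPass, hb1, hb2]; rfl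
      rw [hstep]
      have hM : pvM n L (pvCnt Rl) = 1 + pvM n (L.erase (w + 1)) (pvCnt (Rl.erase w)) := by
        rw [pvCnt_erase Rl w hwRc]
        exact pvM_act_e n L (pvCnt Rl) w hK Pl.2 hwRc Pf
      have hK' : ∀ u ∈ L.erase (w + 1), 1 < u ∧ u < n :=
        fun u hu => hK u (List.mem_of_mem_erase hu)
      have := ih (L.erase (w + 1)) (Rl.erase w) (a + 1) (pvCnt_cons_le hs hwR) hK'
      rw [this, hM]; push_cast; ring
    · -- neither: skip
      have hb1 : (decide (w - 1 > 0) && L.contains (w - 1)) = false := by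
        rw [← Bool.not_eq_true]
        simp only [Bool.and_eq_true, decide_eq_true_eq, List.contains_iff_mem]
        rintro ⟨h1, h2⟩; exact Pf ⟨h1, h2⟩
      have hb2 : (decide (w + 1 < n + 1) && L.contains (w + 1)) = false := by
        rw [← Bool.not_eq_true]
        simp only [Bool.and_eq_true, decide_eq_true_eq, List.contains_iff_mem]
        rintro ⟨h1, h2⟩; exact Pl ⟨h1, h2⟩
      have hstep : pvResPass n (w :: s) (L, Rl, a) = pvResPass n s (L, Rl, a) := by
        simp only [pvResPass, hb1, hb2]; rfl
      rw [hstep]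
      exact ih L Rl a (pvCnt_tail_le hs) hK

-- if the snapshot contains a reserve student whose give-to-latter condition holds,
-- the reserve pass strictly shrinks the lost list
theorem pvResPass_progress (n : Int) (s : List Int) : ∀ (L Rl : List Int) (a : Int),
    (∃ r ∈ s, (r + 1 < n + 1 ∧ r + 1 ∈ L) ∧ ¬(r - 1 > 0 ∧ r - 1 ∈ L)) →
    (pvResPass n s (L, Rl, a)).1.length < L.length := by
  induction s with
  | nil => intro L Rl a h; rcases h with ⟨r, hr, _⟩; exact absurd hr (List.not_mem_nil)
  | cons w s ih =>
    intro L Rl a hex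
    by_cases Pf : (w - 1 > 0 ∧ w - 1 ∈ L) <;> by_cases Pl : (w + 1 < n + 1 ∧ w + 1 ∈ L)
    · -- skip
      have hb1 : (decide (w - 1 > 0) && L.contains (w - 1)) = true := by
        simp only [Bool.and_eq_true, decide_eq_true_eq, List.contains_iff_mem]
        exact ⟨Pf.1, Pf.2⟩
      have hb2 : (decide (w + 1 < n + 1) && L.contains (w + 1)) = true := by
        simp only [Bool.and_eq_true, decide_eq_true_eq, List.contains_iff_mem]
        exact ⟨Pl.1, Pl.2⟩
      have hstep : pvResPass n (w :: s) (L, Rl, a) = pvResPass n s (L, Rl, a) := by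
        simp only [pvResPass, hb1, hb2]; rfl
      rw [hstep]
      rcases hex with ⟨r, hr, hc1, hc2⟩
      rcases List.mem_cons.mp hr with he | hr'
      · subst he; exact absurd Pf hc2
      · exact ih L Rl a ⟨r, hr', hc1, hc2⟩
    · -- branch d fires
      have hb1 : (decide (w - 1 > 0) && L.contains (w - 1)) = true := by
        simp only [Bool.and_eq_true, decide_eq_true_eq, List.contains_iff_mem]
        exact ⟨Pf.1, Pf.2⟩
      have hb2 : (decide (w + 1 < n + 1) && L.contains (w + 1)) = false := by
        rw [← Bool.not_eq_true]
        simp only [Bool.and_eq_true, decide_eq_true_eq, List.contains_iff_mem]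
        rintro ⟨h1, h2⟩; exact Pl ⟨h1, h2⟩
      have hstep : pvResPass n (w :: s) (L, Rl, a)
          = pvResPass n s (L.erase (w - 1), Rl.erase w, a + 1) := by
        simp only [pvResPass, hb1, hb2]; rfl
      rw [hstep]
      have h1 := pvResPass_len n s (L.erase (w - 1)) (Rl.erase w) (a + 1)
      have h2 : (L.erase (w - 1)).length = L.length - 1 := List.length_erase_of_mem Pf.2
      have h3 : 0 < L.length := List.length_pos_of_mem Pf.2
      omega
    · -- branch e fires
      have hb1 : (decide (w - 1 > 0) && L.contains (w - 1)) = false := by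
        rw [← Bool.not_eq_true]
        simp only [Bool.and_eq_true, decide_eq_true_eq, List.contains_iff_mem]
        rintro ⟨h1, h2⟩; exact Pf ⟨h1, h2⟩
      have hb2 : (decide (w + 1 < n + 1) && L.contains (w + 1)) = true := by
        simp only [Bool.and_eq_true, decide_eq_true_eq, List.contains_iff_mem]
        exact ⟨Pl.1, Pl.2⟩
      have hstep : pvResPass n (w :: s) (L, Rl, a)
          = pvResPass n s (L.erase (w + 1), Rl.erase w, a + 1) := by
        simp only [pvResPass, hb1, hb2]; rfl
      rw [hstep]
      have h1 := pvResPass_len n s (L.erase (w + 1)) (Rl.erase w) (a + 1)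
      have h2 : (L.erase (w + 1)).length = L.length - 1 := List.length_erase_of_mem Pl.2
      have h3 : 0 < L.length := List.length_pos_of_mem Pl.2
      omega
    · -- neither: skip
      have hb1 : (decide (w - 1 > 0) && L.contains (w - 1)) = false := by
        rw [← Bool.not_eq_true]
        simp only [Bool.and_eq_true, decide_eq_true_eq, List.contains_iff_mem]
        rintro ⟨h1, h2⟩; exact Pf ⟨h1, h2⟩
      have hb2 : (decide (w + 1 < n + 1) && L.contains (w + 1)) = false := by
        rw [← Bool.not_eq_true]
        simp only [Bool.and_eq_true, decide_eq_true_eq, List.contains_iff_mem]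
        rintro ⟨h1, h2⟩; exact Pl ⟨h1, h2⟩
      have hstep : pvResPass n (w :: s) (L, Rl, a) = pvResPass n s (L, Rl, a) := by
        simp only [pvResPass, hb1, hb2]; rfl
      rw [hstep]
      rcases hex with ⟨r, hr, hc1, hc2⟩
      rcases List.mem_cons.mp hr with he | hr'
      · subst he; exact absurd hc1 Pl
      · exact ih L Rl a ⟨r, hr', hc1, hc2⟩

theorem pvWhile_inv (n : Int) : ∀ (fuel : Nat) (L Rl : List Int) (a : Int),
    L.length < fuel →
    pvWhile n fuel (L, Rl, a) = a + (pvM n L (pvCnt Rl) : Int) := by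
  intro fuel
  induction fuel with
  | zero => intro L Rl a h; omega
  | succ f ih =>
    intro L Rl a hlen
    by_cases hL : L.isEmpty
    · rw [List.isEmpty_iff] at hL
      subst hL
      simp [pvWhile, pvM_nil]
    · have hLne : L ≠ [] := fun he => hL (by simp [he])
      have hstep : pvWhile n (f + 1) (L, Rl, a)
          = pvWhile n f (pvResPass n (pvLostPass n L (L, Rl, a)).2.1 (pvLostPass n L (L, Rl, a))) := by
        simp only [pvWhile, hL]
        rfl
      set st1 := pvLostPass n L (L, Rl, a) with hst1
      obtain ⟨i1, i2, i3, i4⟩ := pvLostPass_inv n L L Rl a (fun v => le_refl _)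
      rw [← hst1] at i1 i2 i3 i4
      have hK1 : ∀ u ∈ st1.1, 1 < u ∧ u < n := by
        intro u hu
        by_contra hbad
        have hc := i4 u hbad
        have hp : 0 < st1.1.count u := List.count_pos_iff.mpr hu
        omega
      have hphi2 := pvResPass_inv n st1.2.1 st1.1 st1.2.1 st1.2.2 (fun v => le_refl _) hK1
      have hlen1 : st1.1.length ≤ L.length := by rw [hst1]; exact pvLostPass_len n L L Rl a
      have hlt : (pvResPass n st1.2.1 (st1.1, st1.2.1, st1.2.2)).1.length < L.length := by
        rcases lt_or_eq_of_le hlen1 with hlt1 | heq1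
        · exact lt_of_le_of_lt (pvResPass_len n st1.2.1 st1.1 st1.2.1 st1.2.2) hlt1
        · have heq1' : (pvLostPass n L (L, Rl, a)).1.length = L.length := by rw [← hst1]; omega
          obtain ⟨hstall, hcond⟩ := pvLostPass_stall n L L Rl a (fun v => le_refl _) heq1'
          obtain ⟨m, hm, hmin⟩ := list_exists_min L hLne
          have hcm := hcond m hm
          have hL1 : st1.1 = L := by rw [hst1, hstall]
          have hR1 : st1.2.1 = Rl := by rw [hst1, hstall]
          have hwitness : (m - 1) + 1 < n + 1 ∧ (m - 1) + 1 ∈ st1.1 := by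
            constructor
            · have := hcm.2.1; omega
            · have e : m - 1 + 1 = m := by ring
              rw [e, hL1]; exact hm
          have hnotf : ¬((m - 1) - 1 > 0 ∧ (m - 1) - 1 ∈ st1.1) := by
            rintro ⟨_, hmem⟩
            rw [hL1] at hmem
            have := hmin _ hmem
            omega
          have hmemR : m - 1 ∈ st1.2.1 := by
            rw [hR1]
            exact pvMem_of_cnt Rl (m - 1) hcm.1.2
          have hprog := pvResPass_progress n st1.2.1 st1.1 st1.2.1 st1.2.2
            ⟨m - 1, hmemR, hwitness, hnotf⟩
          rw [hL1] at hprog ⊢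
          exact hprog
      rw [hstep]
      have heta : (st1.1, st1.2.1, st1.2.2) = st1 := rfl
      rw [heta] at hlt hphi2
      have hres := ih (pvResPass n st1.2.1 st1).1 (pvResPass n st1.2.1 st1).2.1
        (pvResPass n st1.2.1 st1).2.2 (by omega)
      calc pvWhile n f (pvResPass n st1.2.1 st1)
          = pvWhile n f ((pvResPass n st1.2.1 st1).1, (pvResPass n st1.2.1 st1).2.1,
              (pvResPass n st1.2.1 st1).2.2) := rfl
        _ = (pvResPass n st1.2.1 st1).2.2
              + (pvM n (pvResPass n st1.2.1 st1).1 (pvCnt (pvResPass n st1.2.1 st1).2.1) : Int) := hres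
        _ = st1.2.2 + (pvM n st1.1 (pvCnt st1.2.1) : Int) := hphi2
        _ = a + (pvM n L (pvCnt Rl) : Int) := i1

-- A's self-rescue phase and B's split phase walk the same snapshot against the same
-- shrinking reserve list, so they agree up to the multiset of kept lost students
theorem pvSelfSplit (s : List Int) : ∀ (L need rem : List Int) (a : Int),
    (∀ v, L.count v = need.count v + s.count v) →
    (L.length = need.length + s.length) →
    (∀ v, (pvSelf s (L, rem, a)).1.count v = (pvSplit s (need, rem)).1.count v)
    ∧ (pvSelf s (L, rem, a)).2.1 = (pvSplit s (need, rem)).2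
    ∧ (pvSelf s (L, rem, a)).1.length = (pvSplit s (need, rem)).1.length
    ∧ (pvSelf s (L, rem, a)).2.2 + ((pvSelf s (L, rem, a)).1.length : Int) = a + L.length := by
  induction s with
  | nil =>
    intro L need rem a hcnt hlen
    have h3 : L.length = need.length := by simpa using hlen
    exact ⟨fun v => by have := hcnt v; simpa using this, rfl,
      by simpa [pvSelf, pvSplit] using h3, by simp [pvSelf]⟩
  | cons w s ih =>
    intro L need rem a hcnt hlen
    have hwL : w ∈ L := by
      have h1 := hcnt w
      simp only [List.count_cons_self] at h1
      exact List.count_pos_iff.mp (by omega)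
    by_cases hc : rem.contains w
    · have hstepA : pvSelf (w :: s) (L, rem, a) = pvSelf s (L.erase w, rem.erase w, a + 1) := by
        simp only [pvSelf, hc]; rfl
      have hstepB : pvSplit (w :: s) (need, rem) = pvSplit s (need, rem.erase w) := by
        simp only [pvSplit, hc]; rfl
      rw [hstepA, hstepB]
      have hcnt' : ∀ v, (L.erase w).count v = need.count v + s.count v := by
        intro v
        have h0 := hcnt v
        rw [List.count_erase]
        rcases eq_or_ne v w with he | hne
        · subst he
          simp only [List.count_cons_self] at h0
          simp
          omega
        · simp only [List.count_cons, beq_iff_eq] at h0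
          rw [if_neg (fun hh : w = v => hne hh.symm)] at h0
          simp only [beq_iff_eq]
          rw [if_neg (fun hh : w = v => hne hh.symm)]
          omega
      have hlen' : (L.erase w).length = need.length + s.length := by
        have h1 := List.length_erase_of_mem hwL
        have h2 := List.length_pos_of_mem hwL
        have h3 : (w :: s).length = s.length + 1 := rfl
        omega
      obtain ⟨j1, j2, j3, j4⟩ := ih (L.erase w) need (rem.erase w) (a + 1) hcnt' hlen'
      refine ⟨j1, j2, j3, ?_⟩
      have hLe : ((L.erase w).length : Int) = (L.length : Int) - 1 := by
        have := List.length_erase_of_mem hwL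
        have := List.length_pos_of_mem hwL
        push_cast
        omega
      rw [j4, hLe]
      push_cast
      ring
    · have hstepA : pvSelf (w :: s) (L, rem, a) = pvSelf s (L, rem, a) := by
        simp only [pvSelf, hc]; rfl
      have hstepB : pvSplit (w :: s) (need, rem) = pvSplit s (need ++ [w], rem) := by
        simp only [pvSplit, hc]; rfl
      rw [hstepA, hstepB]
      have hcnt' : ∀ v, L.count v = (need ++ [w]).count v + s.count v := by
        intro v
        have h0 := hcnt v
        rw [List.count_append]
        rcases eq_or_ne v w with he | hne
        · subst he
          simp only [List.count_cons_self] at h0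
          simp
          omega
        · simp only [List.count_cons, beq_iff_eq] at h0
          rw [if_neg (fun hh : w = v => hne hh.symm)] at h0
          have hif1 : (if w = v then (1:Nat) else 0) = 0 := if_neg (fun hh => hne hh.symm)
          have hif2 : (if v = w then (1:Nat) else 0) = 0 := if_neg hne
          simp only [List.count_append, List.count_singleton, List.count_cons, List.count_nil, beq_iff_eq, hif1, hif2]
          omega
      have hlen' : L.length = (need ++ [w]).length + s.length := by
        have h1 : (need ++ [w]).length = need.length + 1 := by simp
        have h2 : (w :: s).length = s.length + 1 := rfl
        omega
      exact ih L (need ++ [w]) rem a hcnt' hlen'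

-- B's greedy pass over a sorted needy list computes exactly pvM
theorem pvGreedy_eval (n : Int) (s : List Int) : ∀ (rem : List Int) (a : Int),
    s.Pairwise (· ≤ ·) →
    pvGreedy n s rem a = a + (pvM n s (pvCnt rem) : Int) := by
  induction s with
  | nil => intro rem a _; simp [pvGreedy, pvM_nil]
  | cons w s ih =>
    intro rem a hp
    rcases List.pairwise_cons.mp hp with ⟨hhead, htail⟩
    have hmin : ∀ u ∈ w :: s, w ≤ u := by
      intro u hu
      rcases List.mem_cons.mp hu with he | hu'
      · subst he; exact le_refl _
      · exact hhead u hu'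
    have herase : (w :: s).erase w = s := by simp
    by_cases Pf : (0 < w - 1 ∧ 0 < pvCnt rem (w - 1))
    · have hb1 : (decide (w - 1 > 0) && rem.contains (w - 1)) = true := (pvCond_iff _ _ _).mpr Pf
      have hstep : pvGreedy n (w :: s) rem a = pvGreedy n s (rem.erase (w - 1)) (a + 1) := by
        simp only [pvGreedy, hb1]; rfl
      rw [hstep, ih _ _ htail]
      have hM : pvM n (w :: s) (pvCnt rem) = 1 + pvM n s (pvCnt (rem.erase (w - 1))) := by
        rw [pvCnt_erase rem (w - 1) Pf.2]
        have := pvM_act_greedy n (w :: s) (pvCnt rem) w (List.mem_cons_self) hmin Pf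
        rwa [herase] at this
      rw [hM]
      push_cast
      ring
    · have hb1 : (decide (w - 1 > 0) && rem.contains (w - 1)) = false := by
        rw [← Bool.not_eq_true]; intro hcc; exact Pf ((pvCond_iff _ _ _).mp hcc)
      by_cases Pl : (w + 1 < n + 1 ∧ 0 < pvCnt rem (w + 1))
      · have hb2 : (decide (w + 1 < n + 1) && rem.contains (w + 1)) = true := (pvCond_iff _ _ _).mpr Pl
        have hstep : pvGreedy n (w :: s) rem a = pvGreedy n s (rem.erase (w + 1)) (a + 1) := by
          simp only [pvGreedy, hb1, hb2]; rfl
        rw [hstep, ih _ _ htail]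
        have hM : pvM n (w :: s) (pvCnt rem) = 1 + pvM n s (pvCnt (rem.erase (w + 1))) := by
          rw [pvCnt_erase rem (w + 1) Pl.2]
          have := pvM_act_c n (w :: s) (pvCnt rem) w (List.mem_cons_self) Pf Pl
          rwa [herase] at this
        rw [hM]
        push_cast
        ring
      · have hb2 : (decide (w + 1 < n + 1) && rem.contains (w + 1)) = false := by
          rw [← Bool.not_eq_true]; intro hcc; exact Pl ((pvCond_iff _ _ _).mp hcc)
        have hstep : pvGreedy n (w :: s) rem a = pvGreedy n s rem a := by
          simp only [pvGreedy, hb1, hb2]; rfl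
        rw [hstep, ih _ _ htail]
        have hM : pvM n (w :: s) (pvCnt rem) = pvM n s (pvCnt rem) := by
          have := pvM_act_a n (w :: s) (pvCnt rem) w (List.mem_cons_self) Pf Pl
          rwa [herase] at this
        rw [hM]

theorem solution_eq (n : Int) (lost reserve : List Int) :
    solution n lost reserve = solution_alt n lost reserve := by
  unfold solution solution_alt
  obtain ⟨j1, j2, j3, j4⟩ := pvSelfSplit lost lost [] reserve (n - lost.length)
    (fun v => by simp) (by simp)
  set stA := pvSelf lost (lost, reserve, n - lost.length) with hstA
  set p := pvSplit lost ([], reserve) with hp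
  have hA : pvWhile n (stA.1.length + 1) stA = stA.2.2 + (pvM n stA.1 (pvCnt stA.2.1) : Int) := by
    have := pvWhile_inv n (stA.1.length + 1) stA.1 stA.2.1 stA.2.2 (by omega)
    exact this
  have hsortperm : (PySem.List.sorted p.1 (fun x => x) false).Perm p.1 := PySem.List.sorted_perm _ _ _
  have hpair : (PySem.List.sorted p.1 (fun x => x) false).Pairwise (· ≤ ·) :=
    PySem.List.sorted_pairwise _ _
  have hB : pvGreedy n (PySem.List.sorted p.1 (fun x => x) false) p.2 (n - p.1.length)
      = (n - p.1.length) + (pvM n (PySem.List.sorted p.1 (fun x => x) false) (pvCnt p.2) : Int) :=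
    pvGreedy_eval n _ p.2 (n - p.1.length) hpair
  have hperm : stA.1.Perm (PySem.List.sorted p.1 (fun x => x) false) := by
    apply List.Perm.trans (List.perm_iff_count.mpr j1) hsortperm.symm
  have hMeq : pvM n stA.1 (pvCnt stA.2.1) = pvM n (PySem.List.sorted p.1 (fun x => x) false) (pvCnt p.2) := by
    rw [j2]
    exact pvM_perm n hperm (pvCnt p.2)
  have hans : stA.2.2 = n - (p.1.length : Int) := by
    rw [← j3]
    omega
  rw [hA, hB, hMeq, hans]

-- ===== VERDICT (by name: the statement is the Claim_ definition above) =====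
theorem solution_spec : Claim_equal_solution := by
  intro n lost reserve _
  unfold Spec_solution
  exact solution_eq n lost reserve
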